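-- pv_equiv track=rewrite | github.com/SimonOuellette35/ARC_gym | ARC_gym/grid_sampling/object_grid_generation.py | _is_vertically_symmetric
-- ===== SOURCE A (Python) =====
-- def _is_vertically_symmetric(pixels):
--     """True iff the set of (r,c) is symmetric about some horizontal axis (min_r+max_r - r)."""
--     if not pixels:
--         return True
--     rows = [r for (r, _) in pixels]
--     min_r, max_r = min(rows), max(rows)
--     center_double = min_r + max_r
--     for (r, c) in pixels:
--         mirror_r = center_double - r
--         if (mirror_r, c) not in pixels:
--             return False
--     return True
-- ===== SOURCE B (Python) =====
-- def _is_vertically_symmetric(pixels):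
--     """Index-first check: group rows by column, then per-column set-palindrome test."""
--     if not pixels:
--         return True
--     cols = {}
--     for (r, c) in pixels:
--         cols.setdefault(c, []).append(r)
--     all_rows = [r for (r, _) in pixels]
--     cd = min(all_rows) + max(all_rows)
--     for rows in cols.values():
--         if set(rows) != {cd - r for r in rows}:
--             return False
--     return True
-- ===== Notes on version B (the rewrite author's own statement) =====
-- stated objective: alternative
-- what changed: Replaces A's per-pixel membership scan over the flat pixel list with a column index (dict column -> list of rows built in one pass) and a per-column set-palindrome check (row-set equals its reflection about min_r+max_r).
import Mathlib
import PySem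

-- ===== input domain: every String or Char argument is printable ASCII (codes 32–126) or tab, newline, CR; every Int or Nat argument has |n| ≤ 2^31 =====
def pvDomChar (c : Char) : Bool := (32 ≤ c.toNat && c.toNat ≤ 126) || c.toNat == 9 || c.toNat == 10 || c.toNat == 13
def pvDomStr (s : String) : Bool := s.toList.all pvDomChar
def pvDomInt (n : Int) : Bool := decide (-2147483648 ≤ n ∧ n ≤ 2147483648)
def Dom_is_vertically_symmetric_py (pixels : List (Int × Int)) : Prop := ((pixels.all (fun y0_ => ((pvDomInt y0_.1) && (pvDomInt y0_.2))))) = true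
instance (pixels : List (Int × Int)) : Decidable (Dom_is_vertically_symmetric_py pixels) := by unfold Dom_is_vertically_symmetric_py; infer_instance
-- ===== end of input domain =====

-- B replaces A's flat per-pixel membership scan with a column index (dict column -> row list)
-- plus a per-column set-palindrome check: an alternative decomposition, not claimed faster.

-- ===== PORT A =====
-- the 'for (r,c) in pixels: if … return False' loop with final 'return True' is List.all;
-- min(rows)/max(rows): rows is nonempty under this match arm, so the .getD 0 default is never the result.
def is_vertically_symmetric_py (pixels : List (Int × Int)) : Bool :=
  match pixels with
  | [] => true
  | _ :: _ =>
    let rows := pixels.map (fun p => p.1)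
    let min_r := (PySem.List.min? rows (fun x => x)).getD 0
    let max_r := (PySem.List.max? rows (fun x => x)).getD 0
    let center_double := min_r + max_r
    pixels.all (fun p => pixels.contains (center_double - p.1, p.2))

-- ===== PORT B =====
-- cols.setdefault(c, []).append(r) is Dict.modify c [] (· ++ [r]); iterating cols.values() in
-- insertion order; set(rows) != {cd - r for r in rows} is ¬ Set.equal of the two ofList sets.
def is_vertically_symmetric_py_alt (pixels : List (Int × Int)) : Bool :=
  match pixels with
  | [] => true
  | _ :: _ =>
    let cols := pixels.foldl
      (fun (d : PySem.Dict Int (List Int)) p => d.modify p.2 [] (fun l => l ++ [p.1]))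
      PySem.Dict.empty
    let all_rows := pixels.map (fun p => p.1)
    let cd := (PySem.List.min? all_rows (fun x => x)).getD 0
            + (PySem.List.max? all_rows (fun x => x)).getD 0
    (PySem.Dict.values cols).all (fun rows =>
      PySem.Set.equal (PySem.Set.ofList rows)
        (PySem.Set.ofList (rows.map (fun r => cd - r))))

-- ===== PRECONDITION & SPEC =====
def Spec_is_vertically_symmetric_py (pixels : List (Int × Int)) (out : Bool) : Prop := out = is_vertically_symmetric_py_alt pixels
instance (pixels : List (Int × Int)) (out : Bool) : Decidable (Spec_is_vertically_symmetric_py pixels out) := by unfold Spec_is_vertically_symmetric_py; infer_instance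

-- ===== CLAIM (what is proved, stated in full; the proofs are below) =====
def Claim_equal_is_vertically_symmetric_py : Prop := ∀ (pixels : List (Int × Int)), Dom_is_vertically_symmetric_py pixels → Spec_is_vertically_symmetric_py pixels (is_vertically_symmetric_py pixels)

-- ===== LEMMAS AND PROOFS =====

-- the rows stored for column c are exactly the first components of the pixels in that column
theorem pv_getD_cols (pixels : List (Int × Int)) (c : Int) :
    (pixels.foldl (fun (d : PySem.Dict Int (List Int)) p => d.modify p.2 [] (fun l => l ++ [p.1]))
      PySem.Dict.empty).getD c []
    = (pixels.filter (fun p => p.2 == c)).map (fun p => p.1) := by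
  have h := PySem.Dict.getD_foldl_modify_append (l := pixels.map (fun p => (p.2, p.1)))
    (d := PySem.Dict.empty) (c := c)
  simp [List.foldl_map, List.filter_map, List.map_map] at h
  simpa using h

-- the keys of the column index are the distinct columns, in first-occurrence order
theorem pv_keys_cols (pixels : List (Int × Int)) :
    (pixels.foldl (fun (d : PySem.Dict Int (List Int)) p => d.modify p.2 [] (fun l => l ++ [p.1]))
      PySem.Dict.empty).keys = PySem.Set.ofList (pixels.map (fun p => p.2)) := by
  have h := PySem.Dict.keys_foldl_modify_key (l := pixels) (key := fun p => p.2)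
    (d0 := ([] : List Int)) (f := fun _ p => (fun l => l ++ [p.1])) (d := PySem.Dict.empty)
  simpa [PySem.Set.update] using h

-- Dict.values.all = keys.all over getD, when the keys are nodup
theorem pv_values_all {κ ν : Type} [BEq κ] [LawfulBEq κ] (d : PySem.Dict κ ν) (dflt : ν)
    (p : ν → Bool) (h : d.keys.Nodup) :
    (PySem.Dict.values d).all p = d.keys.all (fun k => p (d.getD k dflt)) := by
  rw [PySem.Dict.values_eq_map_keys d h dflt, List.all_map]
  rfl

-- membership in a column's row list, stated in simp-normal form
theorem pv_mem_rows (pixels : List (Int × Int)) (c x : Int) :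
    (∃ a ∈ List.filter (fun p => p.2 == c) pixels, a.1 = x) ↔ (x, c) ∈ pixels := by
  simp only [List.mem_filter, beq_iff_eq]
  constructor
  · rintro ⟨⟨r, c'⟩, ⟨hp, rfl⟩, rfl⟩; exact hp
  · intro hp; exact ⟨(x, c), ⟨hp, rfl⟩, rfl⟩

-- core equivalence: the per-pixel mirror scan equals the per-column set-palindrome check
theorem pv_main (pixels : List (Int × Int)) (cd : Int) :
    (pixels.all (fun p => pixels.contains (cd - p.1, p.2)))
    = ((PySem.Dict.values (pixels.foldl
        (fun (d : PySem.Dict Int (List Int)) p => d.modify p.2 [] (fun l => l ++ [p.1]))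
        PySem.Dict.empty)).all (fun rows =>
      PySem.Set.equal (PySem.Set.ofList rows)
        (PySem.Set.ofList (rows.map (fun r => cd - r))))) := by
  have hnd : (pixels.foldl (fun (d : PySem.Dict Int (List Int)) p => d.modify p.2 [] (fun l => l ++ [p.1]))
      PySem.Dict.empty).keys.Nodup := by
    rw [pv_keys_cols]; exact PySem.Set.nodup_ofList _
  rw [pv_values_all _ ([] : List Int) _ hnd, pv_keys_cols]
  rw [Bool.eq_iff_iff]
  simp only [List.all_eq_true, PySem.Set.mem_ofList, pv_getD_cols, PySem.Set.equal_iff,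
    List.contains_iff_mem, List.mem_map, pv_mem_rows]
  constructor
  · intro H c hc x
    constructor
    · intro hx
      exact ⟨cd - x, H _ hx, by ring⟩
    · rintro ⟨r, hr, rfl⟩
      exact H _ hr
  · rintro G ⟨r, c⟩ hp
    exact (G c ⟨(r, c), hp, rfl⟩ (cd - r)).mpr ⟨r, hp, rfl⟩

-- ===== VERDICT (by name: the statement is the Claim_ definition above) =====
theorem is_vertically_symmetric_py_spec : Claim_equal_is_vertically_symmetric_py := by
  intro pixels _
  unfold Spec_is_vertically_symmetric_py is_vertically_symmetric_py is_vertically_symmetric_py_alt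
  cases pixels with
  | nil => rfl
  | cons p ps => exact pv_main (p :: ps) _
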